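-- pv_equiv track=rewrite | github.com/Beni-glith/kacer-bot | bot.py | find_back_num
-- ===== SOURCE A (Python) =====
-- from typing import Dict, List, Optional, Tuple
--
-- def find_back_num(menu_items: List[Tuple[str, str]]) -> str:
--     for num, label in menu_items:
--         if "kemb" in label.lower() or "kembali" in label.lower() or "utama" in label.lower() or "back" in label.lower():
--             return num
--     for num, _ in menu_items:
--         if num in ("00", "0"):
--             return num
--     for num, _ in menu_items:
--         if num == "99":
--             return num
--     return menu_items[0][0] if menu_items else "99"
-- ===== SOURCE B (Python) =====
-- def find_back_num(menu_items):
--     lab = zero = nine = None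
--     for num, label in menu_items:
--         low = label.lower()
--         if lab is None and ("kemb" in low or "utama" in low or "back" in low):
--             lab = num
--         if zero is None and num in ("00", "0"):
--             zero = num
--         if nine is None and num == "99":
--             nine = num
--     if lab is not None:
--         return lab
--     if zero is not None:
--         return zero
--     if nine is not None:
--         return nine
--     return menu_items[0][0] if menu_items else "99"
-- ===== Notes on version B (the rewrite author's own statement) =====
-- stated objective: alternative
-- what changed: Replaces A's three sequential scans (and its redundant 'kembali' test, subsumed by 'kemb') with a single pass maintaining three first-occurrence Option slots, applying the priority after the loop.
import Mathlib
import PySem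

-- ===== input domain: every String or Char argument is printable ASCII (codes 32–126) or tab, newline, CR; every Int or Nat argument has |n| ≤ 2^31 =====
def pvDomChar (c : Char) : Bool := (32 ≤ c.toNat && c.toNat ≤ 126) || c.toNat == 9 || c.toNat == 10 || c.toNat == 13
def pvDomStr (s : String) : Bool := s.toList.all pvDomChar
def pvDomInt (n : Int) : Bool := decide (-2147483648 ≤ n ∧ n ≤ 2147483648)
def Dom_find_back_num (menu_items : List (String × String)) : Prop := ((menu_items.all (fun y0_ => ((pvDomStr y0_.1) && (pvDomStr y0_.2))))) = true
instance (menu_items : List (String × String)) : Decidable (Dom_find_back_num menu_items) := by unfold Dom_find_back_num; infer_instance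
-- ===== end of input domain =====

-- B replaces A's three sequential scans with a single pass keeping three first-occurrence slots (alternative decomposition, same cost).


-- ===== PORT A =====
-- A's first loop's test, verbatim (incl. the redundant "kembali" check)
def aLabelHit (label : String) : Bool :=
  PySem.Str.isIn "kemb" (PySem.Str.lower label) || PySem.Str.isIn "kembali" (PySem.Str.lower label) ||
  PySem.Str.isIn "utama" (PySem.Str.lower label) || PySem.Str.isIn "back" (PySem.Str.lower label)

-- each 'for … return' loop is a first-match scan (List.find?)
def find_back_num (menu_items : List (String × String)) : String :=
  match menu_items.find? (fun p => aLabelHit p.2) with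
  | some p => p.1
  | none =>
    match menu_items.find? (fun p => p.1 == "00" || p.1 == "0") with
    | some p => p.1
    | none =>
      match menu_items.find? (fun p => p.1 == "99") with
      | some p => p.1
      | none => match menu_items with | [] => "99" | p :: _ => p.1

-- ===== PORT B =====
def bLabelHit (label : String) : Bool :=
  PySem.Str.isIn "kemb" (PySem.Str.lower label) ||
  PySem.Str.isIn "utama" (PySem.Str.lower label) || PySem.Str.isIn "back" (PySem.Str.lower label)

-- one loop body: set each slot only when still None
def bStep (st : Option String × Option String × Option String) (p : String × String) :
    Option String × Option String × Option String :=
  ( if st.1.isNone && bLabelHit p.2 then some p.1 else st.1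
  , if st.2.1.isNone && (p.1 == "00" || p.1 == "0") then some p.1 else st.2.1
  , if st.2.2.isNone && (p.1 == "99") then some p.1 else st.2.2 )

def find_back_num_alt (menu_items : List (String × String)) : String :=
  let st := menu_items.foldl bStep (none, none, none)
  match st.1 with
  | some x => x
  | none =>
    match st.2.1 with
    | some x => x
    | none =>
      match st.2.2 with
      | some x => x
      | none => match menu_items with | [] => "99" | p :: _ => p.1

-- ===== PRECONDITION & SPEC =====
def Spec_find_back_num (menu_items : List (String × String)) (out : String) : Prop := out = find_back_num_alt menu_items
instance (menu_items : List (String × String)) (out : String) : Decidable (Spec_find_back_num menu_items out) := by unfold Spec_find_back_num; infer_instance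

-- ===== CLAIM (what is proved, stated in full; the proofs are below) =====
def Claim_equal_find_back_num : Prop := ∀ (menu_items : List (String × String)), Dom_find_back_num menu_items → Spec_find_back_num menu_items (find_back_num menu_items)

-- ===== LEMMAS AND PROOFS =====

-- a some slot is never overwritten
theorem slot_keep {α β : Type} (p : α → Bool) (f : α → β) (a : β) :
    ∀ (xs : List α),
      xs.foldl (fun s x => if s.isNone && p x then some (f x) else s) (some a) = some a := by
  intro xs
  induction xs with
  | nil => rfl
  | cons x xs ih => simpa [List.foldl] using ih

-- a first-occurrence slot fold starting empty is find?
theorem slot_foldl {α β : Type} (p : α → Bool) (f : α → β) :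
    ∀ (xs : List α),
      xs.foldl (fun s x => if s.isNone && p x then some (f x) else s) none =
        (xs.find? p).map f := by
  intro xs
  induction xs with
  | nil => rfl
  | cons x xs ih =>
    cases h : p x with
    | true =>
      rw [List.foldl_cons, List.find?_cons_of_pos (l := xs) h,
        if_pos (show ((Option.isNone (none : Option β)) && p x) = true by simp [h])]
      exact slot_keep p f (f x) xs
    | false =>
      rw [List.foldl_cons, List.find?_cons_of_neg (l := xs) (by simp [h]),
        if_neg (show ¬ ((Option.isNone (none : Option β)) && p x) = true by simp [h])]
      exact ih

-- the triple fold is the three slot folds, componentwise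
theorem bFold_eq :
    ∀ (xs : List (String × String)) (s : Option String × Option String × Option String),
      xs.foldl bStep s =
        ( xs.foldl (fun s x => if s.isNone && bLabelHit x.2 then some x.1 else s) s.1
        , xs.foldl (fun s x => if s.isNone && (x.1 == "00" || x.1 == "0") then some x.1 else s) s.2.1
        , xs.foldl (fun s x => if s.isNone && (x.1 == "99") then some x.1 else s) s.2.2 ) := by
  intro xs
  induction xs with
  | nil => intro s; rfl
  | cons x xs ih => intro s; simp [List.foldl, ih, bStep]

-- "kembali" in low already implies "kemb" in low, so A's test equals B's
theorem labelHit_eq (label : String) : aLabelHit label = bLabelHit label := by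
  unfold aLabelHit bLabelHit
  cases h : PySem.Str.isIn "kembali" (PySem.Str.lower label) with
  | false => simp [h]
  | true =>
    have hinf : ("kembali".toList) <:+: (PySem.Str.lower label).toList :=
      (PySem.Str.isIn_iff_infix _ _).mp h
    have hk : ("kemb".toList) <:+: (PySem.Str.lower label).toList :=
      List.IsInfix.trans (by decide) hinf
    have hkemb : PySem.Str.isIn "kemb" (PySem.Str.lower label) = true :=
      (PySem.Str.isIn_iff_infix _ _).mpr hk
    simp at hkemb
    simp [hkemb]

-- ===== VERDICT (by name: the statement is the Claim_ definition above) =====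
theorem find_back_num_spec : Claim_equal_find_back_num := by
  intro ms _
  unfold Spec_find_back_num find_back_num find_back_num_alt
  have hpred : (fun p : String × String => aLabelHit p.2) = (fun p : String × String => bLabelHit p.2) := by
    funext p; exact labelHit_eq p.2
  simp only [bFold_eq, slot_foldl, hpred]
  cases h1 : ms.find? (fun p => bLabelHit p.2) <;>
    cases h2 : ms.find? (fun p => p.1 == "00" || p.1 == "0") <;>
      cases h3 : ms.find? (fun p => p.1 == "99") <;>
        simp [h1, h2, h3]
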